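-- pv_equiv track=rewrite | github.com/meadowz1/CP104-Projects | bang3786_l11/src/functions.py | find_word_vertical
-- ===== SOURCE A (Python) =====
-- def find_word_vertical(matrix, word):
--     """
--     -------------------------------------------------------
--     Look for word in each column of the given matrix of characters.
--     Returns a list of indexes of all column that are equal to word.
--     Returns an empty list if no column is equal to word.
--     Use: cols = find_word_vertical(matrix, word)
--     -------------------------------------------------------
--     Parameters:
--         matrix - the matrix of characters (2D list of str)
--         word - the word to search for (str)
--     Returns:
--         cols - a list of column indexes (list of int)
--     ------------------------------------------------------
--     """
--     if not matrix:
--         cols = []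
--
--     else:
--         # Simple getters and setters for counting and traversing
--         row = len(matrix) # length of matrix
--         col = len(matrix[0]) # length of lists in matrix
--         cols = [] # index of found values
--
--         for j in range(col):
--             # Convert the column to a string and check if it equals word
--             col_str = ''.join(matrix[i][j] for i in range(row))
--             if col_str == word:
--                 cols.append(j)
--
--     return cols
-- ===== SOURCE B (Python) =====
-- def find_word_vertical(matrix, word):
--     # row-major candidate elimination: keep (column, matched-prefix-length) pairs
--     # and extend each candidate's match with that column's cell on every row
--     if not matrix:
--         return []
--     cand = [(j, 0) for j in range(len(matrix[0]))]
--     for r in matrix: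
--         nxt = []
--         for j, pos in cand:
--             cell = r[j]
--             end = pos + len(cell)
--             if word[pos:end] == cell:
--                 nxt.append((j, end))
--         cand = nxt
--     return [j for j, pos in cand if pos == len(word)]
-- ===== Notes on version B (the rewrite author's own statement) =====
-- stated objective: faster
-- what changed: A builds each column's string independently (column-major nested loops) and compares it to the word; B makes a single row-major pass that maintains a shrinking list of candidate (column, matched-prefix-length) pairs, extending each candidate's match against the corresponding word slice on every row and keeping the candidates that consumed the whole word.
import Mathlib
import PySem

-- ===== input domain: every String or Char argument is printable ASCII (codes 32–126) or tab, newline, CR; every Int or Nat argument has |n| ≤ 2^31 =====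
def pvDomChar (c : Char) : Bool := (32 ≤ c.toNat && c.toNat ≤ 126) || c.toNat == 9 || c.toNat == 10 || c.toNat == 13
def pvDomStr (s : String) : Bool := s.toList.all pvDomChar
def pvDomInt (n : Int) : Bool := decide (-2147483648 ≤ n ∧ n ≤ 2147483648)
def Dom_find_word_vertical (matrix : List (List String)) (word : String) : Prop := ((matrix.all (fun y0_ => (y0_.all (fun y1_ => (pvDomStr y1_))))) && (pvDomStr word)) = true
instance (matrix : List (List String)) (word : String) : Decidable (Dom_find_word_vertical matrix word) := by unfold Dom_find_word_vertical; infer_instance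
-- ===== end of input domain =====

-- B replaces A's column-by-column string building with a single row-major pass that
-- eliminates candidate (column, matched-length) pairs, dropping non-matching columns at their
-- first mismatching row; equivalence is about the return value (A mutates nothing).

-- ===== PORT A =====
-- literal port of A: guard on empty matrix, then for j in range(col) build the column string
-- by indexing matrix[i][j] over i in range(row) and append j on a match.
-- (pyGetD's default "" is only reached where Python would raise IndexError; Pre_ excludes those inputs.)
def find_word_vertical (matrix : List (List String)) (word : String) : List Int :=
  if matrix = [] then []
  else
    let row : Int := matrix.length
    let col : Int := ((PySem.List.pyGetD matrix 0 []).length : Int)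
    (PySem.List.pyRange 0 col).foldl (fun cols j =>
      let col_str := PySem.Str.join "" ((PySem.List.pyRange 0 row).map (fun i =>
        PySem.List.pyGetD (PySem.List.pyGetD matrix i []) j ""))
      if col_str = word then cols ++ [j] else cols) []

-- ===== PORT B =====
-- the inner 'for j, pos in cand' loop of Source B: filter-and-advance the candidate list on one row
-- (pyGetD's default "" is only reached where Python would raise IndexError; Pre_ excludes those inputs.)
def pvRowStep (word : String) (cand : List (Int × Int)) (r : List String) : List (Int × Int) :=
  cand.foldl (fun nxt p =>
    let cell := PySem.List.pyGetD r p.1 ""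
    let e := p.2 + PySem.Str.len cell
    if PySem.Str.slice word (some p.2) (some e) = cell then nxt ++ [(p.1, e)] else nxt) []

-- port of Source B: start with all columns as candidates at position 0, run pvRowStep over the
-- rows, and keep the candidates whose matched length is len(word).
def find_word_vertical_alt (matrix : List (List String)) (word : String) : List Int :=
  if matrix = [] then []
  else
    let cand0 : List (Int × Int) :=
      (PySem.List.pyRange 0 ((PySem.List.pyGetD matrix 0 []).length : Int)).map (fun j => (j, (0 : Int)))
    let final := matrix.foldl (pvRowStep word) cand0
    (final.filter (fun p => p.2 = PySem.Str.len word)).map (·.1)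

-- ===== PRECONDITION & SPEC =====
-- Pre_ excludes exactly the inputs where A raises IndexError: a row shorter than the first row.
def Pre_find_word_vertical (matrix : List (List String)) (word : String) : Prop :=
  ∀ r ∈ matrix, (matrix.headD []).length ≤ r.length
instance (matrix : List (List String)) (word : String) : Decidable (Pre_find_word_vertical matrix word) := by unfold Pre_find_word_vertical; infer_instance
def pvWitness_find_word_vertical : List (List String) × String := ([["a","b"],["c","d"]], "ac")

def Spec_find_word_vertical (matrix : List (List String)) (word : String) (out : List Int) : Prop := out = find_word_vertical_alt matrix word
instance (matrix : List (List String)) (word : String) (out : List Int) : Decidable (Spec_find_word_vertical matrix word out) := by unfold Spec_find_word_vertical; infer_instance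

-- ===== CLAIM (what is proved, stated in full; the proofs are below) =====
def Claim_equal_find_word_vertical : Prop := ∀ (matrix : List (List String)) (word : String), Dom_find_word_vertical matrix word → Pre_find_word_vertical matrix word → Spec_find_word_vertical matrix word (find_word_vertical matrix word)

-- ===== LEMMAS AND PROOFS =====

-- the characters of column j restricted to the given rows, concatenated
def pvColChars (rows : List (List String)) (j : Nat) : List Char :=
  (rows.map (fun r => (r.getD j "").toList)).flatten

-- the candidate list after the given rows have been processed
def pvCand (word : String) (rows : List (List String)) (n : Nat) : List (Int × Int) :=
  (List.range n).filterMap (fun j =>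
    if pvColChars rows j <+: word.toList
    then some ((j : Int), ((pvColChars rows j).length : Int)) else none)

lemma getD_zero_eq_headD' (xs : List (List String)) : xs.getD 0 [] = xs.headD [] := by
  cases xs <;> rfl

lemma join_empty_eq_flatten (parts : List (List Char)) :
    PySem.Chars.join [] parts = parts.flatten := by
  show List.intercalate [] parts = parts.flatten
  induction parts with
  | nil => rfl
  | cons a t ih =>
    cases t with
    | nil => simp [List.intercalate]
    | cons b u =>
      simp only [List.intercalate, List.intersperse] at *
      simp_all [List.flatten]

lemma filter_map_eq_filterMap (l : List Nat) (p : Nat → Bool) (f : Nat → Int) :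
    (l.filter p).map f = l.filterMap (fun x => if p x then some (f x) else none) := by
  induction l with
  | nil => rfl
  | cons a t ih => by_cases h : p a = true <;> simp [h, ih]

lemma foldl_if_append {α β : Type} (c : α → Prop) [DecidablePred c] (f : α → β)
    (l : List α) (acc : List β) :
    l.foldl (fun nxt x => if c x then nxt ++ [f x] else nxt) acc
      = acc ++ l.filterMap (fun x => if c x then some (f x) else none) := by
  induction l generalizing acc with
  | nil => simp
  | cons a t ih => by_cases h : c a <;> simp [h, ih]

lemma pvColChars_append (rows : List (List String)) (r : List String) (j : Nat) :
    pvColChars (rows ++ [r]) j = pvColChars rows j ++ (r.getD j "").toList := by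
  simp [pvColChars]

-- one pvRowStep advances pvCand by one row
lemma pvRowStep_cand (word : String) (rows : List (List String)) (r : List String) (n : Nat) :
    pvRowStep word (pvCand word rows n) r = pvCand word (rows ++ [r]) n := by
  unfold pvRowStep pvCand
  rw [foldl_if_append (fun p : Int × Int =>
        PySem.Str.slice word (some p.2) (some (p.2 + PySem.Str.len (PySem.List.pyGetD r p.1 ""))) = PySem.List.pyGetD r p.1 "")
      (fun p : Int × Int => (p.1, p.2 + PySem.Str.len (PySem.List.pyGetD r p.1 ""))),
      List.nil_append, List.filterMap_filterMap]
  apply List.filterMap_congr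
  intro j hj
  set W := word.toList with hW
  set s := pvColChars rows j with hs
  set c := (r.getD j "").toList with hc
  have hcA : pvColChars (rows ++ [r]) j = s ++ c := pvColChars_append rows r j
  by_cases hpre : s <+: W
  · have hWeq : W = s ++ W.drop s.length := by
      conv_lhs => rw [← List.take_append_drop s.length W]
      rw [← List.prefix_iff_eq_take.mp hpre]
    have hiff2 : s ++ c <+: W ↔ c <+: W.drop s.length := by
      conv_lhs => rw [hWeq]
      exact List.prefix_append_right_inj s
    have hcell : PySem.List.pyGetD r ((j : Nat) : Int) "" = r.getD j "" :=
      PySem.List.pyGetD_natCast r j ""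
    have hcond :
        (PySem.Str.slice word (some ((s.length : Nat) : Int))
            (some (((s.length : Nat) : Int) + PySem.Str.len (PySem.List.pyGetD r ((j : Nat) : Int) ""))) = PySem.List.pyGetD r ((j : Nat) : Int) "")
          ↔ c <+: W.drop s.length := by
      rw [hcell, ← String.toList_inj, PySem.Str.toList_slice, PySem.Chars.slice_eq_listSlice,
          PySem.Str.len_eq, ← hc, ← hW, PySem.List.slice_natCast_add]
      constructor
      · intro h; exact List.prefix_iff_eq_take.mpr h.symm
      · intro h; exact (List.prefix_iff_eq_take.mp h).symm
    simp only [hpre, if_pos, Option.bind_some, hcA, hiff2]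
    simp only [hcond]
    by_cases hd : c <+: W.drop s.length
    · simp only [hd, if_pos]
      congr 2
      rw [hcell, PySem.Str.len_eq, ← hc]
      push_cast [List.length_append]
      ring
    · simp [hd]
  · have hnp : ¬ (s ++ c <+: W) := fun h => hpre ((List.prefix_append s c).trans h)
    simp [hpre, hcA, hnp]

-- the row loop of Source B maintains pvCand
lemma pvLoop_cand (word : String) (n : Nat) (rs : List (List String)) :
    ∀ (proc : List (List String)),
    rs.foldl (pvRowStep word) (pvCand word proc n) = pvCand word (proc ++ rs) n := by
  induction rs with
  | nil => intro proc; simp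
  | cons r t ih =>
    intro proc
    rw [List.foldl_cons, pvRowStep_cand word proc r n, ih (proc ++ [r])]
    simp

lemma pvCand_nil (word : String) (n : Nat) :
    pvCand word [] n = (List.range n).map (fun (j : Nat) => ((j : Int), (0 : Int))) := by
  unfold pvCand
  have : ∀ j, pvColChars [] j = [] := fun j => rfl
  simp [this]

-- ===== VERDICT (by name: the statement is the Claim_ definition above) =====
theorem find_word_vertical_spec : Claim_equal_find_word_vertical := by
  intro matrix word _ hpre
  unfold Spec_find_word_vertical
  by_cases hm : matrix = []
  · subst hm
    simp [find_word_vertical, find_word_vertical_alt]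
  · set n := (matrix.headD []).length with hn
    have hget0 : PySem.List.pyGetD matrix 0 [] = matrix.headD [] := by
      have h0 := PySem.List.pyGetD_natCast matrix 0 []
      rw [show ((0 : Nat) : Int) = (0 : Int) from rfl] at h0
      rw [h0, getD_zero_eq_headD']
    -- B side: candidate elimination computes exactly the full-column prefixes
    have hcand0 : ((PySem.List.pyRange 0 ((PySem.List.pyGetD matrix 0 []).length : Int)).map
        (fun j => (j, (0 : Int)))) = pvCand word [] n := by
      rw [hget0, ← hn, PySem.List.pyRange_zero_natCast n, List.map_map, pvCand_nil]
      rfl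
    have hB : find_word_vertical_alt matrix word =
        ((pvCand word matrix n).filter (fun p => p.2 = PySem.Str.len word)).map (·.1) := by
      rw [find_word_vertical_alt, if_neg hm]
      simp only [hcand0]
      rw [pvLoop_cand word n matrix [], List.nil_append]
    -- …and keeping only the candidates with pos = len(word) keeps exactly the full matches
    have hB2 : find_word_vertical_alt matrix word =
        (List.range n).filterMap (fun j =>
          if pvColChars matrix j = word.toList then some ((j : Int)) else none) := by
      rw [hB]
      unfold pvCand
      rw [List.filter_filterMap, List.map_filterMap]
      apply List.filterMap_congr
      intro j _
      by_cases hpj : pvColChars matrix j <+: word.toList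
      · rw [if_pos hpj]
        by_cases hfull : pvColChars matrix j = word.toList
        · have hl : ((pvColChars matrix j).length : Int) = PySem.Str.len word := by
            rw [PySem.Str.len_eq, hfull]
          rw [if_pos hfull]
          simp [Option.filter, hl]
        · have hl : ¬ (((pvColChars matrix j).length : Int) = PySem.Str.len word) := by
            rw [PySem.Str.len_eq]
            intro h
            exact hfull (hpj.eq_of_length (by exact_mod_cast h))
          rw [if_neg hfull]
          simp only [Option.filter, decide_eq_true_eq]
          rw [if_neg hl]
          simp
      · have hfull : ¬ pvColChars matrix j = word.toList := by
          intro h; rw [h] at hpj; exact hpj (List.prefix_refl _)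
        rw [if_neg hpj, if_neg hfull]
        simp
    -- A side: column-string building, as a filter over range n
    have hcol : ∀ k : Nat,
        (PySem.List.pyRange 0 (matrix.length : Int)).map (fun i =>
          PySem.List.pyGetD (PySem.List.pyGetD matrix i []) ((k : Nat) : Int) "")
        = matrix.map (fun r => r.getD k "") := by
      intro k
      have hcmp : (fun (i : Int) => PySem.List.pyGetD (PySem.List.pyGetD matrix i []) ((k : Nat) : Int) "")
          = (fun r => r.getD k "") ∘ (fun i => PySem.List.pyGetD matrix i []) := by
        funext i
        simp [Function.comp, PySem.List.pyGetD_natCast]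
      rw [hcmp, ← List.map_map]
      congr 1
      simpa using PySem.List.map_pyGetD_pyRange_zero matrix []
    have hA : find_word_vertical matrix word =
        ((List.range n).filter (fun k =>
          decide (PySem.Str.join "" (matrix.map (fun r => r.getD k "")) = word))).map
          (fun (k : Nat) => (k : Int)) := by
      rw [find_word_vertical, if_neg hm]
      simp only [hget0]
      rw [show ((matrix.headD []).length : Int) = ((n : Nat) : Int) from rfl,
          PySem.List.pyRange_zero_natCast n, List.foldl_map]
      simp only [hcol]
      have hstep : List.foldl (fun (x : List Int) (y : Nat) =>
            if PySem.Str.join "" (matrix.map (fun r => r.getD y "")) = word then x ++ [(y : Int)] else x)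
          [] (List.range n)
          = List.foldl (fun (x : List Int) (y : Nat) =>
            if (fun k : Nat => decide (PySem.Str.join "" (matrix.map (fun r => r.getD k "")) = word)) y = true
            then x ++ [(fun (k : Nat) => (k : Int)) y] else x) [] (List.range n) := by
        apply PySem.List.foldl_congr_mem
        intro acc k _
        simp
      rw [hstep, PySem.List.foldl_append_if]
      simp
    -- the two characterisations agree columnwise
    rw [hA, hB2, filter_map_eq_filterMap]
    apply List.filterMap_congr
    intro j _
    have hjoin : (PySem.Str.join "" (matrix.map (fun r => r.getD j "")) = word)
        ↔ pvColChars matrix j = word.toList := by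
      rw [← String.toList_inj, PySem.Str.toList_join]
      have : ((String.toList "")) = ([] : List Char) := rfl
      rw [this, join_empty_eq_flatten, List.map_map]
      unfold pvColChars
      exact Iff.rfl
    by_cases h : pvColChars matrix j = word.toList
    · rw [if_pos h, if_pos (decide_eq_true (hjoin.mpr h))]
    · have hc : decide (PySem.Str.join "" (List.map (fun r => r.getD j "") matrix) = word) = false := by
        simp only [decide_eq_false_iff_not]
        exact fun hx => h (hjoin.mp hx)
      rw [if_neg h, hc]
      simp
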